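-- pv_equiv track=rewrite | github.com/RyanQchiqache/Machine-Deep-Learning-Center | algorithms/N_Queen_SA.py | maxing_queen
-- ===== SOURCE A (Python) =====
-- def maxing_queen(position):
--     """
--     Calculate the number of non-attacking queens in the given board position.
--
--     Args:
--         position (array-like): An array representing the positions of queens on the board,
--                                where index is the column and value is the row.
--
--     Returns:
--         int: Negative of the number of non-attacking queens. (Using negative for minimization)
--     """
--     queen_not_attacking = 0
--     for i in range(len(position) - 1):
--         no_attack_on_j = 0
--         for j in range(i + 1, len(position)):
--             # Check for no conflicts: same row, and both diagonals
--             if (position[j] != position[i]) and (position[j] != position[i] + (j - i)) and (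
--                     position[j] != position[i] - (j - i)):
--                 no_attack_on_j += 1
--                 # If no queens are attacking each other in this iteration
--                 if no_attack_on_j == len(position) - 1 - i:
--                     queen_not_attacking += 1
--     # Special case for maximum non-attacking queens
--     if queen_not_attacking == len(position) - 1:
--         queen_not_attacking += 1
--     # Return negative value because dual_annealing minimizes the objective
--     return -queen_not_attacking
-- ===== SOURCE B (Python) =====
-- def maxing_queen(position):
--     """O(n) re-implementation: scan columns right-to-left keeping the sets of rows,
--     diagonals and anti-diagonals already seen; queen i attacks no later queen iff
--     its row/diagonal/anti-diagonal is absent from all three sets."""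
--     n = len(position)
--     cnt = 0
--     rows, diags, antis = set(), set(), set()
--     for i in range(n - 1, -1, -1):
--         r = position[i]
--         if i != n - 1 and r not in rows and (r - i) not in diags and (r + i) not in antis:
--             cnt += 1
--         rows.add(r)
--         diags.add(r - i)
--         antis.add(r + i)
--     if cnt == n - 1:
--         cnt += 1
--     return -cnt
-- ===== Notes on version B (the rewrite author's own statement) =====
-- stated objective: faster
-- what changed: Replaced the nested O(n^2) pairwise conflict scan by a single right-to-left pass that maintains hash sets of rows, diagonals and anti-diagonals already seen, so each column is tested in O(1).
import Mathlib
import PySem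

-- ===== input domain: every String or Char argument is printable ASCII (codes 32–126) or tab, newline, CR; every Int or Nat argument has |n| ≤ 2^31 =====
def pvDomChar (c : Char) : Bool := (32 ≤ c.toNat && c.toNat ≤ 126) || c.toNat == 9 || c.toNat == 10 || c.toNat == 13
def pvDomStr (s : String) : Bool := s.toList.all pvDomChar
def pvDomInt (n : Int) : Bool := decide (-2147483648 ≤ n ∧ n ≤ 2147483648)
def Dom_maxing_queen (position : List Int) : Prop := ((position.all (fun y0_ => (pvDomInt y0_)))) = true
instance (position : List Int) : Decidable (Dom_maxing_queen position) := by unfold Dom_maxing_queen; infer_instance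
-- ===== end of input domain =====

-- B replaces A's nested O(n^2) pairwise scan by one right-to-left pass over the columns
-- maintaining the sets of rows/diagonals/anti-diagonals already seen (objective: faster).

-- ===== PORT A =====
-- A's inner-loop no-conflict test, verbatim: position[j] != position[i] and the two diagonals
def pvOKb (p : List Int) (i j : Int) : Bool :=
  decide (PySem.List.pyGetD p j 0 ≠ PySem.List.pyGetD p i 0) &&
  decide (PySem.List.pyGetD p j 0 ≠ PySem.List.pyGetD p i 0 + (j - i)) &&
  decide (PySem.List.pyGetD p j 0 ≠ PySem.List.pyGetD p i 0 - (j - i))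

-- A's inner loop body: state = (no_attack_on_j, queen_not_attacking)
def pvInnerA (p : List Int) (n i : Int) (st : Int × Int) (j : Int) : Int × Int :=
  if pvOKb p i j then
    if st.1 + 1 = n - 1 - i then (st.1 + 1, st.2 + 1) else (st.1 + 1, st.2)
  else st

def maxing_queen (position : List Int) : Int :=
  let n : Int := (position.length : Int)
  let qna : Int :=
    (PySem.List.pyRange 0 (n - 1) 1).foldl
      (fun (qna : Int) (i : Int) =>
        ((PySem.List.pyRange (i + 1) n 1).foldl (pvInnerA position n i) (0, qna)).2)
      0
  if qna = n - 1 then -(qna + 1) else -qna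

-- ===== PORT B =====
-- B's loop body: state = (cnt, rows, diags, antis); counts column i when its row/diagonal/
-- anti-diagonal is absent from the sets of all later columns, then records column i.
def pvStepB (p : List Int) (n : Int)
    (st : Int × PySem.Set Int × PySem.Set Int × PySem.Set Int) (i : Int) :
    Int × PySem.Set Int × PySem.Set Int × PySem.Set Int :=
  let r := PySem.List.pyGetD p i 0
  (if decide (i ≠ n - 1) && !PySem.Set.contains st.2.1 r &&
      !PySem.Set.contains st.2.2.1 (r - i) && !PySem.Set.contains st.2.2.2 (r + i)
   then st.1 + 1 else st.1,
   PySem.Set.add st.2.1 r, PySem.Set.add st.2.2.1 (r - i), PySem.Set.add st.2.2.2 (r + i))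

def maxing_queen_alt (position : List Int) : Int :=
  let n : Int := (position.length : Int)
  let st :=
    (PySem.List.pyRange (n - 1) (-1) (-1)).foldl (pvStepB position n)
      (0, PySem.Set.empty, PySem.Set.empty, PySem.Set.empty)
  if st.1 = n - 1 then -(st.1 + 1) else -st.1

-- ===== PRECONDITION & SPEC =====
def Spec_maxing_queen (position : List Int) (out : Int) : Prop := out = maxing_queen_alt position
instance (position : List Int) (out : Int) : Decidable (Spec_maxing_queen position out) := by unfold Spec_maxing_queen; infer_instance

-- ===== CLAIM (what is proved, stated in full; the proofs are below) =====
def Claim_equal_maxing_queen : Prop := ∀ (position : List Int), Dom_maxing_queen position → Spec_maxing_queen position (maxing_queen position)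

-- ===== LEMMAS AND PROOFS =====

-- "column i attacks no later column", as the bounded boolean test both counts reduce to
def pvNAb (p : List Int) (i : Int) : Bool :=
  (PySem.List.pyRange (i + 1) (p.length : Int) 1).all (fun j => pvOKb p i j)


-- A's inner loop returns (conflict-free js seen, queen counter bumped iff every j passed)
lemma pv_inner (p : List Int) (n i : Int) :
    ∀ (js : List Int) (c0 q0 : Int), c0 + (js.length : Int) ≤ n - 1 - i →
      js.foldl (pvInnerA p n i) (c0, q0)
        = (c0 + (js.countP (fun j => pvOKb p i j) : Int),
           q0 + if c0 + (js.length : Int) = n - 1 - i ∧ js.all (fun j => pvOKb p i j) ∧ js ≠ [] then 1 else 0) := by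
  intro js
  induction js with
  | nil => intro c0 q0 h; simp
  | cons j rest ih =>
      intro c0 q0 h
      have hlen : ((j :: rest).length : Int) = (rest.length : Int) + 1 := by simp
      rw [hlen] at h
      simp only [List.foldl_cons]
      by_cases hp : pvOKb p i j = true
      · rw [show pvInnerA p n i (c0, q0) j =
              (if c0 + 1 = n - 1 - i then ((c0+1 : Int), (q0+1 : Int)) else (c0+1, q0)) by
            simp [pvInnerA, hp]]
        by_cases ht : c0 + 1 = n - 1 - i
        · have hrest : rest = [] := by
            have hlen0 : (rest.length : Int) ≤ 0 := by omega
            have : rest.length = 0 := by exact_mod_cast Int.le_antisymm hlen0 (by positivity)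
            simpa using this
          subst hrest
          rw [if_pos ht]
          simp [hp, ht]
        · rw [if_neg ht]
          rw [ih (c0+1) q0 (by omega)]
          have hiff : (c0 + 1 + (rest.length:Int) = n - 1 - i ∧ (rest.all fun j => pvOKb p i j) = true ∧ rest ≠ [])
              ↔ (c0 + ((j :: rest).length:Int) = n - 1 - i ∧ ((j :: rest).all fun j => pvOKb p i j) = true ∧ (j :: rest) ≠ []) := by
            rw [hlen]
            constructor
            · rintro ⟨h1, h2, h3⟩
              exact ⟨by omega, by simp [hp, h2], by simp⟩
            · rintro ⟨h1, h2, h3⟩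
              rcases List.eq_nil_or_concat rest with hr | _
              · exfalso; subst hr; simp at h1; omega
              · refine ⟨by omega, ?_, ?_⟩
                · simpa [List.all_cons, hp] using h2
                · intro hc; subst hc; simp at h1; omega
          rw [if_congr hiff rfl rfl]
          have : c0 + 1 + ((rest.countP fun j => pvOKb p i j : Nat) : Int)
               = c0 + (((j :: rest).countP fun j => pvOKb p i j : Nat) : Int) := by
            simp [hp]; omega
          rw [Prod.mk.injEq]
          exact ⟨this, rfl⟩
      · rw [show pvInnerA p n i (c0, q0) j = (c0, q0) by simp [pvInnerA, hp]]
        rw [ih c0 q0 (by omega)]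
        have h1 : ((j :: rest).countP fun j => pvOKb p i j) = (rest.countP fun j => pvOKb p i j) := by
          simp [hp]
        have h2 : ¬ (c0 + (rest.length:Int) = n - 1 - i ∧ (rest.all fun j => pvOKb p i j) = true ∧ rest ≠ []) := by
          rintro ⟨ha, -, -⟩; omega
        have h3 : ¬ (c0 + ((j :: rest).length:Int) = n - 1 - i ∧ ((j :: rest).all fun j => pvOKb p i j) = true ∧ (j :: rest) ≠ []) := by
          rintro ⟨-, hb, -⟩; simp [hp] at hb
        rw [if_neg h2, if_neg h3, h1]

-- A's outer loop counts the columns whose whole inner loop passes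
lemma pv_A_count (p : List Int) : ∀ (b : Nat), (b : Int) ≤ (p.length : Int) - 1 → ∀ q0 : Int,
    (PySem.List.pyRange 0 (b : Int) 1).foldl
        (fun (qna : Int) (i : Int) =>
          ((PySem.List.pyRange (i + 1) (p.length : Int) 1).foldl (pvInnerA p (p.length : Int) i) (0, qna)).2)
        q0
      = q0 + ((PySem.List.pyRange 0 (b : Int) 1).countP (fun i => pvNAb p i) : Int) := by
  intro b
  induction b with
  | zero => intro hb q0; simp [PySem.List.pyRange_one_eq_nil]
  | succ b ih =>
      intro hb q0
      have hb' : (b : Int) ≤ (p.length : Int) - 1 := by push_cast at hb ⊢; omega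
      have hsplit : PySem.List.pyRange 0 ((b:Nat)+1 : Int) 1
          = PySem.List.pyRange 0 (b : Int) 1 ++ [(b : Int)] := by
        have := PySem.List.pyRange_one_succ_right (a := 0) (b := (b:Int)) (by positivity)
        push_cast at this
        exact this
      rw [show (((b:Nat)+1 : Nat) : Int) = ((b:Nat)+1 : Int) by push_cast; ring, hsplit]
      rw [List.foldl_append, List.countP_append, ih hb' q0]
      have hlen : ((PySem.List.pyRange ((b:Int) + 1) (p.length : Int) 1).length : Int)
          = (p.length : Int) - 1 - (b:Int) := by
        rw [PySem.List.length_pyRange_one]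
        push_cast at hb ⊢; omega
      have hne : PySem.List.pyRange ((b:Int) + 1) (p.length : Int) 1 ≠ [] := by
        intro hc
        rw [hc] at hlen
        simp at hlen
        push_cast at hb; omega
      simp only [List.foldl_cons, List.foldl_nil, List.countP_cons, List.countP_nil]
      rw [pv_inner p (p.length : Int) (b : Int) _ 0 _ (by omega)]
      have hcond : ((0:Int) + ((PySem.List.pyRange ((b:Int) + 1) (p.length : Int) 1).length : Int)
            = (p.length : Int) - 1 - (b:Int)
          ∧ ((PySem.List.pyRange ((b:Int) + 1) (p.length : Int) 1).all (fun j => pvOKb p (b:Int) j)) = true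
          ∧ PySem.List.pyRange ((b:Int) + 1) (p.length : Int) 1 ≠ [])
          ↔ pvNAb p (b : Int) = true := by
        unfold pvNAb
        constructor
        · rintro ⟨-, h2, -⟩; exact h2
        · intro h2; exact ⟨by omega, h2, hne⟩
      rw [if_congr hcond rfl rfl]
      by_cases hna : pvNAb p (b:Int) = true
      · simp [hna]; omega
      · simp [hna]

-- B's loop invariant: the sets hold the rows/diagonals/anti-diagonals of all later columns,
-- and the counter counts the guarded non-attacking columns processed so far
lemma pv_B_count (p : List Int) : ∀ (k : Nat), (k : Int) ≤ (p.length : Int) →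
    ∀ (c0 : Int) (R D A : List Int),
    (∀ x : Int, x ∈ R ↔ ∃ j : Int, (k : Int) - 1 < j ∧ j < (p.length : Int) ∧ x = PySem.List.pyGetD p j 0) →
    (∀ x : Int, x ∈ D ↔ ∃ j : Int, (k : Int) - 1 < j ∧ j < (p.length : Int) ∧ x = PySem.List.pyGetD p j 0 - j) →
    (∀ x : Int, x ∈ A ↔ ∃ j : Int, (k : Int) - 1 < j ∧ j < (p.length : Int) ∧ x = PySem.List.pyGetD p j 0 + j) →
    ((PySem.List.pyRange ((k : Int) - 1) (-1) (-1)).foldl (pvStepB p (p.length : Int)) (c0, R, D, A)).1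
      = c0 + ((PySem.List.pyRange 0 (k : Int) 1).countP
                (fun i => decide (i ≠ (p.length : Int) - 1) && pvNAb p i) : Int) := by
  intro k
  induction k with
  | zero =>
      intro hk c0 R D A hR hD hA
      rw [PySem.List.pyRange_neg_one_eq_nil (by norm_num), PySem.List.pyRange_one_eq_nil (by norm_num)]
      simp
  | succ k ih =>
      intro hk c0 R D A hR hD hA
      have hk' : (k : Int) ≤ (p.length : Int) := by push_cast at hk ⊢; omega
      have hcast : ((k+1 : Nat) : Int) - 1 = (k : Int) := by push_cast; ring
      rw [hcast, PySem.List.pyRange_neg_one_cons (by omega)]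
      rw [List.foldl_cons]
      -- the step condition at column k agrees with the guarded non-attacking test
      have hcond : (decide ((k:Int) ≠ (p.length : Int) - 1) && !PySem.Set.contains R (PySem.List.pyGetD p (k:Int) 0) &&
            !PySem.Set.contains D (PySem.List.pyGetD p (k:Int) 0 - (k:Int)) && !PySem.Set.contains A (PySem.List.pyGetD p (k:Int) 0 + (k:Int)))
          = (decide ((k:Int) ≠ (p.length : Int) - 1) && pvNAb p (k:Int)) := by
        by_cases hklast : (k:Int) = (p.length : Int) - 1
        · simp [hklast]
        · have hmem : (¬ PySem.List.pyGetD p (k:Int) 0 ∈ R ∧ ¬ (PySem.List.pyGetD p (k:Int) 0 - (k:Int)) ∈ D ∧ ¬ (PySem.List.pyGetD p (k:Int) 0 + (k:Int)) ∈ A) ↔ pvNAb p (k:Int) = true := by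
            unfold pvNAb
            rw [List.all_eq_true]
            constructor
            · rintro ⟨h1, h2, h3⟩ j hj
              rw [PySem.List.mem_pyRange_one] at hj
              unfold pvOKb
              simp only [Bool.and_eq_true, decide_eq_true_eq]
              refine ⟨⟨?_, ?_⟩, ?_⟩
              · intro hc; exact h1 ((hR _).2 ⟨j, by omega, by omega, hc.symm⟩)
              · intro hc; exact h2 ((hD _).2 ⟨j, by omega, by omega, by omega⟩)
              · intro hc; exact h3 ((hA _).2 ⟨j, by omega, by omega, by omega⟩)
            · intro hall
              refine ⟨?_, ?_, ?_⟩
              · intro hc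
                obtain ⟨j, hj1, hj2, hj3⟩ := (hR _).1 hc
                have := hall j (by rw [PySem.List.mem_pyRange_one]; omega)
                unfold pvOKb at this
                simp only [Bool.and_eq_true, decide_eq_true_eq] at this
                exact this.1.1 hj3.symm
              · intro hc
                obtain ⟨j, hj1, hj2, hj3⟩ := (hD _).1 hc
                have := hall j (by rw [PySem.List.mem_pyRange_one]; omega)
                unfold pvOKb at this
                simp only [Bool.and_eq_true, decide_eq_true_eq] at this
                exact this.1.2 (by omega)
              · intro hc
                obtain ⟨j, hj1, hj2, hj3⟩ := (hA _).1 hc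
                have := hall j (by rw [PySem.List.mem_pyRange_one]; omega)
                unfold pvOKb at this
                simp only [Bool.and_eq_true, decide_eq_true_eq] at this
                exact this.2 (by omega)
          by_cases hna : pvNAb p (k:Int) = true
          · obtain ⟨m1, m2, m3⟩ := hmem.2 hna
            have c1 : PySem.Set.contains R (PySem.List.pyGetD p (k:Int) 0) = false :=
              Bool.eq_false_iff.2 (fun hc => m1 ((PySem.Set.contains_iff R _).1 hc))
            have c2 : PySem.Set.contains D (PySem.List.pyGetD p (k:Int) 0 - (k:Int)) = false :=
              Bool.eq_false_iff.2 (fun hc => m2 ((PySem.Set.contains_iff D _).1 hc))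
            have c3 : PySem.Set.contains A (PySem.List.pyGetD p (k:Int) 0 + (k:Int)) = false :=
              Bool.eq_false_iff.2 (fun hc => m3 ((PySem.Set.contains_iff A _).1 hc))
            rw [c1, c2, c3, hna]
            simp
          · have hpf : pvNAb p (k:Int) = false := Bool.eq_false_iff.2 hna
            have : ¬ (¬ PySem.List.pyGetD p (k:Int) 0 ∈ R ∧ ¬ (PySem.List.pyGetD p (k:Int) 0 - (k:Int)) ∈ D ∧ ¬ (PySem.List.pyGetD p (k:Int) 0 + (k:Int)) ∈ A) :=
              fun hc => hna (hmem.1 hc)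
            rw [hpf]
            rcases not_and_or.1 this with hc | hc
            · rw [(PySem.Set.contains_iff R _).2 (not_not.1 hc)]; simp
            · rcases not_and_or.1 hc with hc2 | hc2
              · rw [(PySem.Set.contains_iff D _).2 (not_not.1 hc2)]; simp
              · rw [(PySem.Set.contains_iff A _).2 (not_not.1 hc2)]; simp
      have hstep : pvStepB p (p.length : Int) (c0, R, D, A) (k:Int)
          = (c0 + (if (decide ((k:Int) ≠ (p.length : Int) - 1) && pvNAb p (k:Int)) = true then 1 else 0),
             PySem.Set.add R (PySem.List.pyGetD p (k:Int) 0),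
             PySem.Set.add D (PySem.List.pyGetD p (k:Int) 0 - (k:Int)),
             PySem.Set.add A (PySem.List.pyGetD p (k:Int) 0 + (k:Int))) := by
        unfold pvStepB
        dsimp only
        rw [hcond]
        cases hc : (decide ((k:Int) ≠ (p.length : Int) - 1) && pvNAb p (k:Int)) <;> simp
      rw [hstep]
      rw [ih hk' _ _ _ _
        (fun x => by
          rw [PySem.Set.mem_add, hR x]
          constructor
          · rintro (⟨j, h1, h2, h3⟩ | hx)
            · exact ⟨j, by omega, h2, h3⟩
            · exact ⟨(k:Int), by omega, by push_cast at hk; omega, hx⟩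
          · rintro ⟨j, h1, h2, h3⟩
            by_cases hjk : j = (k:Int)
            · right; rw [hjk] at h3; exact h3
            · left; exact ⟨j, by omega, h2, h3⟩)
        (fun x => by
          rw [PySem.Set.mem_add, hD x]
          constructor
          · rintro (⟨j, h1, h2, h3⟩ | hx)
            · exact ⟨j, by omega, h2, h3⟩
            · exact ⟨(k:Int), by omega, by push_cast at hk; omega, by omega⟩
          · rintro ⟨j, h1, h2, h3⟩
            by_cases hjk : j = (k:Int)
            · right; rw [hjk] at h3; omega
            · left; exact ⟨j, by omega, h2, h3⟩)
        (fun x => by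
          rw [PySem.Set.mem_add, hA x]
          constructor
          · rintro (⟨j, h1, h2, h3⟩ | hx)
            · exact ⟨j, by omega, h2, h3⟩
            · exact ⟨(k:Int), by omega, by push_cast at hk; omega, by omega⟩
          · rintro ⟨j, h1, h2, h3⟩
            by_cases hjk : j = (k:Int)
            · right; rw [hjk] at h3; omega
            · left; exact ⟨j, by omega, h2, h3⟩)]
      have hsplit : PySem.List.pyRange 0 ((k+1 : Nat) : Int) 1
          = PySem.List.pyRange 0 (k : Int) 1 ++ [(k : Int)] := by
        have := PySem.List.pyRange_one_succ_right (a := 0) (b := (k:Int)) (by omega)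
        push_cast at this ⊢
        exact this
      rw [hsplit, List.countP_append]
      simp only [List.countP_cons, List.countP_nil]
      cases hc : (decide ((k:Int) ≠ (p.length : Int) - 1) && pvNAb p (k:Int)) with
      | false => simp
      | true => simp; omega

-- ===== VERDICT (by name: the statement is the Claim_ definition above) =====
theorem maxing_queen_spec : Claim_equal_maxing_queen := by
  intro p _hdom
  unfold Spec_maxing_queen maxing_queen maxing_queen_alt
  dsimp only
  rcases p with - | ⟨h, t⟩
  · rfl
  · set p := h :: t with hp
    have hlen : p.length = t.length + 1 := by rw [hp]; rfl
    have hn1 : 1 ≤ (p.length : Int) := by omega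
    -- A's counter
    have hbcast : (((p.length - 1 : Nat)) : Int) = (p.length : Int) - 1 := by
      omega
    have hA := pv_A_count p (p.length - 1) (by omega) 0
    rw [hbcast] at hA
    -- B's counter
    have hB := pv_B_count p p.length le_rfl 0 PySem.Set.empty PySem.Set.empty PySem.Set.empty
      (fun x => ⟨fun hx => absurd hx (List.not_mem_nil), fun ⟨j, h1, h2, _⟩ => by omega⟩)
      (fun x => ⟨fun hx => absurd hx (List.not_mem_nil), fun ⟨j, h1, h2, _⟩ => by omega⟩)
      (fun x => ⟨fun hx => absurd hx (List.not_mem_nil), fun ⟨j, h1, h2, _⟩ => by omega⟩)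
    -- the two counts agree
    have hsplit : PySem.List.pyRange 0 (p.length : Int) 1
        = PySem.List.pyRange 0 ((p.length : Int) - 1) 1 ++ [(p.length : Int) - 1] := by
      have := PySem.List.pyRange_one_succ_right (a := 0) (b := (p.length : Int) - 1) (by omega)
      rw [show (p.length : Int) - 1 + 1 = (p.length : Int) by ring] at this
      exact this
    have hcounts : ((PySem.List.pyRange 0 (p.length : Int) 1).countP
          (fun i => decide (i ≠ (p.length : Int) - 1) && pvNAb p i))
        = ((PySem.List.pyRange 0 ((p.length : Int) - 1) 1).countP (fun i => pvNAb p i)) := by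
      rw [hsplit, List.countP_append]
      have hlast : (List.countP (fun i => decide (i ≠ (p.length : Int) - 1) && pvNAb p i) [(p.length : Int) - 1]) = 0 := by
        simp
      rw [hlast, Nat.add_zero]
      apply List.countP_congr
      intro i hi
      rw [PySem.List.mem_pyRange_one] at hi
      simp only [Bool.and_eq_true, decide_eq_true_eq]
      constructor
      · rintro ⟨-, h2⟩; exact h2
      · intro h2; exact ⟨by omega, h2⟩
    rw [hA, hB, hcounts]
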